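-- pv_equiv track=rewrite | github.com/trevortomesh/NeOak | neoak/docsgen.py | _parse_javadoc
-- ===== SOURCE A (Python) =====
-- from typing import List, Optional
--
-- def _parse_javadoc(block: str) -> tuple[str, dict[str, List[str]]]:
--     text = block.strip()
--     # Strip leading * prefixes
--     lines = []
--     for ln in text.splitlines():
--         ln = ln.strip()
--         if ln.startswith('*'):
--             ln = ln[1:].lstrip()
--         lines.append(ln)
--     desc_lines: List[str] = []
--     tags: dict[str, List[str]] = {}
--     current_tag: Optional[str] = None
--     for ln in lines:
--         if ln.startswith('@'):
--             parts = ln.split(None, 1)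
--             tag = parts[0][1:]
--             rest = parts[1] if len(parts) > 1 else ''
--             tags.setdefault(tag, []).append(rest)
--             current_tag = tag
--         else:
--             if current_tag is None:
--                 desc_lines.append(ln)
--             else:
--                 # continuation of previous tag
--                 if tags[current_tag]:
--                     tags[current_tag][-1] += ('\n' + ln) if ln else ''
--     return ("\n".join(desc_lines).strip(), tags)
-- ===== SOURCE B (Python) =====
-- def _parse_javadoc(block: str) -> tuple[str, dict[str, list[str]]]:
--     lines = []
--     for raw in block.strip().splitlines():
--         ln = raw.strip()
--         if ln.startswith('*'):
--             ln = ln[1:].lstrip()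
--         lines.append(ln)
--     # group: leading description run, then one group per '@' line with its continuations
--     desc_group = []
--     rest = lines
--     while rest and not rest[0].startswith('@'):
--         desc_group.append(rest[0])
--         rest = rest[1:]
--     tags: dict[str, list[str]] = {}
--     while rest:
--         head, rest = rest[0], rest[1:]
--         cont = []
--         while rest and not rest[0].startswith('@'):
--             if rest[0]:
--                 cont.append(rest[0])
--             rest = rest[1:]
--         parts = head.split(None, 1)
--         name = parts[0][1:]
--         first = parts[1] if len(parts) > 1 else ''
--         tags.setdefault(name, []).append("\n".join([first] + cont))
--     return ("\n".join(desc_group).strip(), tags)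
-- ===== Notes on version B (the rewrite author's own statement) =====
-- stated objective: alternative
-- what changed: Replaces A's single-pass current_tag state machine (which mutates the last entry of the current tag's list line by line) with an explicit grouping pass: the leading run of non-tag lines is the description, then each tag line opens a group whose non-empty continuation lines are joined with newlines in one step before being appended under the tag name.
import Mathlib
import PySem

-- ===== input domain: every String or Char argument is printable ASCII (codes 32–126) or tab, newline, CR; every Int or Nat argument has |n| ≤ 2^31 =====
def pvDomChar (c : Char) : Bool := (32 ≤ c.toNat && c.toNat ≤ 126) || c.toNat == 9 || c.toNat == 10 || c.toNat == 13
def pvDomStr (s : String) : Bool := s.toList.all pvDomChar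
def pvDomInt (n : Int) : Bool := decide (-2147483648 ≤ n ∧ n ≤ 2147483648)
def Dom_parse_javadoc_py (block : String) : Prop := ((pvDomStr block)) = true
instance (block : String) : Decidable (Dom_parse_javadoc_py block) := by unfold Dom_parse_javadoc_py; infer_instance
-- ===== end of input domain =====

-- B replaces A's current_tag state machine by an explicit grouping pass (leading description
-- run, then one group per tag line with its continuation lines); same values, different decomposition.

-- shared preamble of both Pythons: strip the block, strip each line, drop a leading '*'
def pvCleanLines (block : String) : List String :=
  (PySem.Str.splitlines (PySem.Str.strip block)).foldl
    (fun acc raw =>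
      let ln := PySem.Str.strip raw
      acc ++ [if PySem.Str.startswith ln "*" then
                PySem.Str.lstrip (PySem.Str.slice ln (some 1) none)
              else ln]) []

-- ===== PORT A =====
-- one iteration of A's loop over the lines; state = (desc_lines, tags, current_tag)
def pvAStep (st : List String × PySem.Dict String (List String) × Option String) (ln : String) :
    List String × PySem.Dict String (List String) × Option String :=
  match st with
  | (desc, tags, cur) =>
    if PySem.Str.startswith ln "@" then
      let parts := PySem.Str.split₀Max ln 1
      let tag := PySem.Str.slice (PySem.List.pyGetD parts 0 "") (some 1) none
      let rest := if parts.length > 1 then PySem.List.pyGetD parts 1 "" else ""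
      -- tags.setdefault(tag, []).append(rest): append rest to the entry at tag (created [] if absent)
      (desc, tags.modify tag [] (fun l => l ++ [rest]), some tag)
    else
      match cur with
      | none => (desc ++ [ln], tags, cur)
      | some c =>
        -- tags[c] is always present here (c was set right after inserting it), so getD is exact
        if (tags.getD c []).isEmpty then (desc, tags, cur)
        else (desc,
              tags.modify c [] (fun l =>
                l.dropLast ++ [PySem.List.pyGetD l (-1) "" ++ (if ln = "" then "" else "\n" ++ ln)]),
              cur)

def parse_javadoc_py (block : String) : String × (List (String × List String)) :=
  let lines := pvCleanLines block
  let st := lines.foldl pvAStep ([], PySem.Dict.empty, none)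
  (PySem.Str.strip (PySem.Str.join "\n" st.1), st.2.1.items)

-- ===== PORT B =====
def pvNT (l : String) : Bool := !PySem.Str.startswith l "@"

-- one group per tag head line: its non-empty continuation run joins onto the head's rest
def pvBGroups : List String → PySem.Dict String (List String) → PySem.Dict String (List String)
  | [], tags => tags
  | head :: t, tags =>
      let cont := (t.takeWhile pvNT).filter (fun l => decide (l ≠ ""))
      let parts := PySem.Str.split₀Max head 1
      let name := PySem.Str.slice (PySem.List.pyGetD parts 0 "") (some 1) none
      let first := if parts.length > 1 then PySem.List.pyGetD parts 1 "" else ""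
      pvBGroups (t.dropWhile pvNT)
        (tags.modify name [] (fun l => l ++ [PySem.Str.join "\n" (first :: cont)]))
termination_by l _ => l.length
decreasing_by
  simp only [List.length_cons]
  exact Nat.lt_succ_of_le (List.length_dropWhile_le _ _)

def parse_javadoc_py_alt (block : String) : String × (List (String × List String)) :=
  let lines := pvCleanLines block
  let desc := lines.takeWhile pvNT
  let rest := lines.dropWhile pvNT
  (PySem.Str.strip (PySem.Str.join "\n" desc), (pvBGroups rest PySem.Dict.empty).items)

-- ===== PRECONDITION & SPEC =====
def Spec_parse_javadoc_py (block : String) (out : String × (List (String × List String))) : Prop := out = parse_javadoc_py_alt block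
instance (block : String) (out : String × (List (String × List String))) : Decidable (Spec_parse_javadoc_py block out) := by unfold Spec_parse_javadoc_py; infer_instance

-- ===== CLAIM (what is proved, stated in full; the proofs are below) =====
def Claim_equal_parse_javadoc_py : Prop := ∀ (block : String), Dom_parse_javadoc_py block → Spec_parse_javadoc_py block (parse_javadoc_py block)

-- ===== LEMMAS AND PROOFS =====

-- the string A's continuation steps accumulate onto the group's last entry
def pvJoinFold (cont : List String) (s : String) : String :=
  cont.foldl (fun a ln => a ++ (if ln = "" then "" else "\n" ++ ln)) s

theorem pvJoin_singleton (s : String) : PySem.Str.join "\n" [s] = s := by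
  simp [PySem.Str.join, PySem.Chars.join_singleton, String.ofList_toList]

theorem pvJoin_shift (s ln : String) (r : List String) :
    PySem.Str.join "\n" ((s ++ ("\n" ++ ln)) :: r) = PySem.Str.join "\n" (s :: ln :: r) := by
  cases r with
  | nil =>
      simp [PySem.Str.join, PySem.Chars.join_singleton, PySem.Chars.join_cons_cons,
        String.toList_append, List.append_assoc]
  | cons q qs =>
      simp [PySem.Str.join, PySem.Chars.join_cons_cons, String.toList_append, List.append_assoc]

theorem pvJoinFold_eq_join (cont : List String) (s : String) :
    pvJoinFold cont s =
      PySem.Str.join "\n" (s :: cont.filter (fun l => decide (l ≠ ""))) := by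
  induction cont generalizing s with
  | nil => simp [pvJoinFold, pvJoin_singleton]
  | cons ln t ih =>
      by_cases h : ln = ""
      · subst h
        simpa [pvJoinFold, List.foldl_cons] using ih s
      · have step : pvJoinFold (ln :: t) s = pvJoinFold t (s ++ ("\n" ++ ln)) := by
          simp [pvJoinFold, List.foldl_cons, h]
        rw [step, ih, pvJoin_shift]
        simp [h]

-- one continuation step of A, on a dict whose entry at c has the group value s appended last
theorem pvAStep_cont (desc : List String) (tags : PySem.Dict String (List String))
    (c s ln : String) (h : pvNT ln = true) :
    pvAStep (desc, tags.modify c [] (fun l => l ++ [s]), some c) ln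
      = (desc, tags.modify c [] (fun l => l ++ [s ++ (if ln = "" then "" else "\n" ++ ln)]), some c) := by
  have hsw : PySem.Str.startswith ln "@" = false := by
    simpa [pvNT] using h
  simp only [pvAStep, hsw, Bool.false_eq_true, if_false, PySem.Dict.modify,
    PySem.Dict.getD_insert, PySem.Dict.insert_insert_self]
  simp

-- A's loop over a run of continuation lines accumulates pvJoinFold onto the last entry at c
theorem pvContFold (cont : List String) (hc : ∀ l ∈ cont, pvNT l = true)
    (desc : List String) (tags : PySem.Dict String (List String)) (c s : String) :
    cont.foldl pvAStep (desc, tags.modify c [] (fun l => l ++ [s]), some c)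
      = (desc, tags.modify c [] (fun l => l ++ [pvJoinFold cont s]), some c) := by
  induction cont generalizing s with
  | nil => simp [pvJoinFold]
  | cons ln t ih =>
      have hln : pvNT ln = true := hc ln (by simp)
      have ht : ∀ l ∈ t, pvNT l = true := fun l hl => hc l (by simp [hl])
      rw [List.foldl_cons, pvAStep_cont desc tags c s ln hln,
        ih ht (s ++ (if ln = "" then "" else "\n" ++ ln))]
      simp [pvJoinFold, List.foldl_cons]

-- group phase: from a state that has just opened a group (s appended at c), A's loop
-- computes exactly B's grouping pass
theorem pvGroupPhase : ∀ (n : Nat) (t : List String), t.length ≤ n →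
    ∀ (desc : List String) (tags : PySem.Dict String (List String)) (c s : String),
    ∃ c', t.foldl pvAStep (desc, tags.modify c [] (fun l => l ++ [s]), some c)
      = (desc,
         pvBGroups (t.dropWhile pvNT)
           (tags.modify c [] (fun l => l ++
             [PySem.Str.join "\n" (s :: (t.takeWhile pvNT).filter (fun l => decide (l ≠ "")))])),
         some c') := by
  intro n
  induction n with
  | zero =>
      intro t ht desc tags c s
      have : t = [] := List.length_eq_zero_iff.mp (Nat.le_zero.mp ht)
      subst this
      exact ⟨c, by simp [pvBGroups, pvJoin_singleton]⟩
  | succ n ih =>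
      intro t ht desc tags c s
      have hsplit : t.takeWhile pvNT ++ t.dropWhile pvNT = t := List.takeWhile_append_dropWhile
      have hcont : ∀ l ∈ t.takeWhile pvNT, pvNT l = true := fun l hl => List.mem_takeWhile_imp hl
      have hfold : t.foldl pvAStep (desc, tags.modify c [] (fun l => l ++ [s]), some c)
          = (t.takeWhile pvNT ++ t.dropWhile pvNT).foldl pvAStep
              (desc, tags.modify c [] (fun l => l ++ [s]), some c) := by rw [hsplit]
      rw [hfold, List.foldl_append, pvContFold (t.takeWhile pvNT) hcont desc tags c s,
        pvJoinFold_eq_join]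
      cases hrest : t.dropWhile pvNT with
      | nil => exact ⟨c, by simp [pvBGroups]⟩
      | cons h' t' =>
          have hh : pvNT h' = false := by
            have := List.head?_dropWhile_not pvNT t
            rw [hrest] at this; simpa using this
          have hsw : PySem.Chars.startswith h'.toList ['@'] = true := by
            have : PySem.Str.startswith h' "@" = true := by simpa [pvNT] using hh
            simpa using this
          have hlen : t'.length ≤ n := by
            have : (t.takeWhile pvNT).length + (h' :: t').length = t.length := by
              rw [← List.length_append, ← hrest, hsplit]
            simp only [List.length_cons] at this
            omega
          rw [List.foldl_cons]
          have hstep : pvAStep (desc,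
              tags.modify c [] (fun l => l ++
                [PySem.Str.join "\n" (s :: (t.takeWhile pvNT).filter (fun l => decide (l ≠ "")))]),
              some c) h'
            = (desc,
               (tags.modify c [] (fun l => l ++
                 [PySem.Str.join "\n" (s :: (t.takeWhile pvNT).filter (fun l => decide (l ≠ "")))])).modify
                 (PySem.Str.slice (PySem.List.pyGetD (PySem.Str.split₀Max h' 1) 0 "") (some 1) none) []
                 (fun l => l ++ [if (PySem.Str.split₀Max h' 1).length > 1
                                 then PySem.List.pyGetD (PySem.Str.split₀Max h' 1) 1 "" else ""]),
               some (PySem.Str.slice (PySem.List.pyGetD (PySem.Str.split₀Max h' 1) 0 "") (some 1) none)) := by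
            simp [pvAStep, hsw]
          rw [hstep]
          obtain ⟨c', hc'⟩ := ih t' hlen desc
            (tags.modify c [] (fun l => l ++
              [PySem.Str.join "\n" (s :: (t.takeWhile pvNT).filter (fun l => decide (l ≠ "")))]))
            (PySem.Str.slice (PySem.List.pyGetD (PySem.Str.split₀Max h' 1) 0 "") (some 1) none)
            (if (PySem.Str.split₀Max h' 1).length > 1
             then PySem.List.pyGetD (PySem.Str.split₀Max h' 1) 1 "" else "")
          exact ⟨c', by rw [hc']; simp [pvBGroups]⟩

-- description phase: A's loop over non-tag lines only appends them to desc_lines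
theorem pvDescPhase (pre : List String) (hp : ∀ l ∈ pre, pvNT l = true)
    (desc : List String) (d : PySem.Dict String (List String)) :
    pre.foldl pvAStep (desc, d, none) = (desc ++ pre, d, none) := by
  induction pre generalizing desc with
  | nil => simp
  | cons ln t ih =>
      have hsw : PySem.Chars.startswith ln.toList ['@'] = false := by
        have : PySem.Str.startswith ln "@" = false := by simpa [pvNT] using hp ln (by simp)
        simpa using this
      rw [List.foldl_cons]
      have : pvAStep (desc, d, none) ln = (desc ++ [ln], d, none) := by
        simp [pvAStep, hsw]
      rw [this, ih (fun l hl => hp l (by simp [hl]))]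
      simp

-- whole loop: description phase then group phase
theorem pvMain (lines : List String) (d : PySem.Dict String (List String)) :
    ∃ c', lines.foldl pvAStep ([], d, none)
      = (lines.takeWhile pvNT, pvBGroups (lines.dropWhile pvNT) d, c') := by
  have hsplit : lines.takeWhile pvNT ++ lines.dropWhile pvNT = lines := List.takeWhile_append_dropWhile
  have hfold : lines.foldl pvAStep ([], d, none)
      = (lines.takeWhile pvNT ++ lines.dropWhile pvNT).foldl pvAStep ([], d, none) := by rw [hsplit]
  rw [hfold, List.foldl_append,
    pvDescPhase (lines.takeWhile pvNT) (fun l hl => List.mem_takeWhile_imp hl) [] d]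
  cases hrest : lines.dropWhile pvNT with
  | nil => exact ⟨none, by simp [pvBGroups]⟩
  | cons h' t' =>
      have hh : pvNT h' = false := by
        have := List.head?_dropWhile_not pvNT lines
        rw [hrest] at this; simpa using this
      have hsw : PySem.Chars.startswith h'.toList ['@'] = true := by
        have : PySem.Str.startswith h' "@" = true := by simpa [pvNT] using hh
        simpa using this
      rw [List.foldl_cons]
      have hstep : pvAStep (([] : List String) ++ lines.takeWhile pvNT, d, none) h'
        = (lines.takeWhile pvNT,
           d.modify (PySem.Str.slice (PySem.List.pyGetD (PySem.Str.split₀Max h' 1) 0 "") (some 1) none) []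
             (fun l => l ++ [if (PySem.Str.split₀Max h' 1).length > 1
                             then PySem.List.pyGetD (PySem.Str.split₀Max h' 1) 1 "" else ""]),
           some (PySem.Str.slice (PySem.List.pyGetD (PySem.Str.split₀Max h' 1) 0 "") (some 1) none)) := by
        simp [pvAStep, hsw]
      rw [hstep]
      obtain ⟨c', hc'⟩ := pvGroupPhase t'.length t' le_rfl (lines.takeWhile pvNT) d
        (PySem.Str.slice (PySem.List.pyGetD (PySem.Str.split₀Max h' 1) 0 "") (some 1) none)
        (if (PySem.Str.split₀Max h' 1).length > 1
         then PySem.List.pyGetD (PySem.Str.split₀Max h' 1) 1 "" else "")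
      refine ⟨some c', ?_⟩
      rw [hc']; simp [pvBGroups]

-- ===== VERDICT (by name: the statement is the Claim_ definition above) =====
theorem parse_javadoc_py_spec : Claim_equal_parse_javadoc_py := by
  intro block _
  unfold Spec_parse_javadoc_py
  obtain ⟨c', hc'⟩ := pvMain (pvCleanLines block) PySem.Dict.empty
  simp only [parse_javadoc_py, parse_javadoc_py_alt, hc']
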